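-- pv_equiv track=rewrite | github.com/pranitashedage1/Coding-Practice | Examples/Make Power Nondecreasing.py | makePowerNonDecreasing
-- ===== SOURCE A (Python) =====
-- def makePowerNonDecreasing(power):
--     n = len(power)
--     total_increament = 0
--     i = 1
--     while i < n:
--         if power[i] < power[i-1]:
--             increament = power[i-1] - power[i]
--             for j in range(i, n):
--                 power[j] += increament
--             total_increament += increament
--         i += 1
--     return total_increament
-- ===== SOURCE B (Python) =====
-- def makePowerNonDecreasing(power):
--     # single pass: the answer is the sum of the positive consecutive drops
--     # of the ORIGINAL array (A mutates its argument in place; B does not —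
--     # the equivalence is about the return value)
--     return sum(max(0, a - b) for a, b in zip(power, power[1:]))
-- ===== Notes on version B (the rewrite author's own statement) =====
-- stated objective: faster
-- what changed: Replaced the quadratic while-loop that repeatedly adds the current drop to the whole suffix (mutating the list) with a single zip pass summing the positive consecutive drops of the original array.
import Mathlib
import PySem

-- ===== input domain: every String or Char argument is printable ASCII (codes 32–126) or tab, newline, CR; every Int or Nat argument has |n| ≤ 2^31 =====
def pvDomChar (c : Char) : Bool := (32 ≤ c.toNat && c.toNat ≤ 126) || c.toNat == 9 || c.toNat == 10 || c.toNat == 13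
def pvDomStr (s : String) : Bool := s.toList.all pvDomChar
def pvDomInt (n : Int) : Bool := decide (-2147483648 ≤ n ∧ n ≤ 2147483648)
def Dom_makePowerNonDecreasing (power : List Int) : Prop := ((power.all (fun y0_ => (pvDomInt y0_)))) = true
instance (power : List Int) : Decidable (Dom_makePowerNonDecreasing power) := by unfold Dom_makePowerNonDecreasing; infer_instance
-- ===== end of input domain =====

-- B replaces A's quadratic suffix-adding while-loop with one linear pass summing the
-- positive consecutive drops of the original array (objective: faster; A mutates its
-- argument in place, B does not — the equivalence proved is about the return value).

-- ===== PORT A =====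
-- the while-loop of A; `power` is the (mutated) list, `n` the fixed len, `i` the loop index
def pvALoop (power : List Int) (n i : Nat) (total : Int) : Int :=
  if i < n then
    if PySem.List.pyGetD power (i : Int) 0 < PySem.List.pyGetD power ((i : Int) - 1) 0 then
      -- increament = power[i-1] - power[i]; for j in range(i, n): power[j] += increament
      let inc := PySem.List.pyGetD power ((i : Int) - 1) 0 - PySem.List.pyGetD power (i : Int) 0
      pvALoop ((PySem.List.pyRange (i : Int) (n : Int) 1).foldl
                 (fun q j => PySem.List.pySetD q j (PySem.List.pyGetD q j 0 + inc)) power)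
        n (i + 1) (total + inc)
    else
      pvALoop power n (i + 1) total
  else total
termination_by n - i

def makePowerNonDecreasing (power : List Int) : Int :=
  pvALoop power power.length 1 0

-- ===== PORT B =====
-- power[1:] is ported as List.drop 1 (exact: nonnegative start, no stop)
def makePowerNonDecreasing_alt (power : List Int) : Int :=
  (power.zip (power.drop 1)).foldl (fun acc p => acc + max 0 (p.1 - p.2)) 0

-- ===== PRECONDITION & SPEC =====
def Spec_makePowerNonDecreasing (power : List Int) (out : Int) : Prop := out = makePowerNonDecreasing_alt power
instance (power : List Int) (out : Int) : Decidable (Spec_makePowerNonDecreasing power out) := by unfold Spec_makePowerNonDecreasing; infer_instance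

-- ===== CLAIM (what is proved, stated in full; the proofs are below) =====
def Claim_equal_makePowerNonDecreasing : Prop := ∀ (power : List Int), Dom_makePowerNonDecreasing power → Spec_makePowerNonDecreasing power (makePowerNonDecreasing power)

-- ===== LEMMAS AND PROOFS =====

-- sum of the positive consecutive drops, the value both programs compute
def pvDrops : List Int → Int
  | a :: b :: t => max 0 (a - b) + pvDrops (b :: t)
  | _ => 0

theorem pvDrops_short (l : List Int) (h : l.length ≤ 1) : pvDrops l = 0 := by
  match l, h with
  | [], _ => rfl
  | [a], _ => rfl

theorem pvDrops_map_add (c : Int) : ∀ l : List Int, pvDrops (l.map (· + c)) = pvDrops l := by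
  intro l
  induction l with
  | nil => rfl
  | cons a t ih =>
    cases t with
    | nil => rfl
    | cons b t' =>
      simp only [List.map, pvDrops] at *
      rw [ih]
      have : max 0 (a + c - (b + c)) = max 0 (a - b) := by ring_nf
      omega

theorem pvZipFold (l : List Int) : ∀ acc : Int,
    (l.zip (l.drop 1)).foldl (fun acc p => acc + max 0 (p.1 - p.2)) acc = acc + pvDrops l := by
  induction l with
  | nil => intro acc; simp [pvDrops]
  | cons a t ih =>
    intro acc
    cases t with
    | nil => simp [pvDrops]
    | cons b t' =>
      have h1 : (a :: b :: t').zip (List.drop 1 (a :: b :: t'))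
          = (a, b) :: ((b :: t').zip (List.drop 1 (b :: t'))) := by simp [List.zip]
      rw [h1]
      simp only [List.foldl, pvDrops]
      rw [ih]
      ring

theorem pvSuffixFold (inc : Int) : ∀ (k : Nat) (p : List Int) (i : Nat), p.length - i = k → i ≤ p.length →
    (PySem.List.pyRange (i : Int) (p.length : Int) 1).foldl
        (fun q j => PySem.List.pySetD q j (PySem.List.pyGetD q j 0 + inc)) p
      = p.take i ++ (p.drop i).map (· + inc) := by
  intro k
  induction k with
  | zero =>
    intro p i hk hle
    have hi : i = p.length := by omega
    subst hi
    rw [PySem.List.pyRange_one_eq_nil (by omega)]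
    simp
  | succ k ih =>
    intro p i hk hle
    have hlt : i < p.length := by omega
    rw [PySem.List.pyRange_one_cons (by exact_mod_cast hlt)]
    simp only [List.foldl]
    rw [show ((i : Int) + 1) = ((i + 1 : Nat) : Int) by push_cast; ring]
    have hget : PySem.List.pyGetD p (i : Int) 0 = p[i] := by
      rw [PySem.List.pyGetD_eq_getElem p 0 (by omega) (by exact_mod_cast hlt)]; simp
    have hset : PySem.List.pySetD p (i : Int) (PySem.List.pyGetD p (i : Int) 0 + inc)
        = p.set i (p[i] + inc) := by rw [hget]; simp
    rw [hset]
    have hlen : (p.set i (p[i] + inc)).length = p.length := by simp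
    rw [show ((p.length : Int)) = (((p.set i (p[i] + inc)).length : Nat) : Int) by rw [hlen]]
    rw [ih (p.set i (p[i] + inc)) (i + 1) (by omega) (by omega)]
    have hsp : p.set i (p[i] + inc) = p.take i ++ (p[i] + inc) :: p.drop (i + 1) := by
      rw [List.set_eq_take_append_cons_drop]
      simp [hlt]
    rw [hsp]
    have htl : (p.take i).length = i := by simp [List.length_take]; omega
    rw [show p.drop i = p[i] :: p.drop (i + 1) from List.drop_eq_getElem_cons hlt]
    simp [List.take_append, List.drop_append, htl, List.take_take]
    have h2 : List.drop (i + 1) (List.take i (List.map (fun x => x + inc) p)) = ([] : List Int) := by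
      apply List.drop_eq_nil_of_le
      simp [List.length_take]
    have hmlt : i < (List.map (fun x => x + inc) p).length := by simpa using hlt
    rw [h2, List.drop_eq_getElem_cons hmlt]
    simp

theorem pvALoop_eq : ∀ (k : Nat) (p : List Int) (i : Nat) (t : Int), 1 ≤ i → p.length - i = k →
    pvALoop p p.length i t = t + pvDrops (p.drop (i - 1)) := by
  intro k
  induction k with
  | zero =>
    intro p i t h1 hk
    rw [pvALoop]
    simp only [if_neg (by omega : ¬ i < p.length)]
    rw [pvDrops_short _ (by simp; omega)]
    omega
  | succ k ih =>
    intro p i t h1 hk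
    have hlt : i < p.length := by omega
    have hi1 : i - 1 < p.length := by omega
    have hget : PySem.List.pyGetD p (i : Int) 0 = p[i] := by
      rw [PySem.List.pyGetD_eq_getElem p 0 (by omega) (by exact_mod_cast hlt)]; simp
    have hgetm : PySem.List.pyGetD p ((i : Int) - 1) 0 = p[i - 1] := by
      rw [show ((i : Int) - 1) = ((i - 1 : Nat) : Int) by omega]
      rw [PySem.List.pyGetD_eq_getElem p 0 (by omega) (by exact_mod_cast hi1)]; simp
    have hdrop : p.drop (i - 1) = p[i - 1] :: p[i] :: p.drop (i + 1) := by
      rw [List.drop_eq_getElem_cons hi1,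
          show i - 1 + 1 = i by omega,
          List.drop_eq_getElem_cons hlt]
    rw [pvALoop]
    simp only [if_pos hlt, hget, hgetm]
    by_cases hc : p[i] < p[i - 1]
    · simp only [if_pos hc]
      rw [pvSuffixFold _ (p.length - i) p i rfl (by omega)]
      set inc := p[i - 1] - p[i] with hinc
      set p' := p.take i ++ (p.drop i).map (· + inc) with hp'
      have hlen' : p'.length = p.length := by simp [hp']; omega
      rw [← hlen']
      rw [ih p' (i + 1) _ (by omega) (by omega)]
      have hdrop' : p'.drop (i + 1 - 1) = (p.drop i).map (· + inc) := by
        simp only [hp', Nat.add_sub_cancel, List.drop_append]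
        have htl : (p.take i).length = i := by simp [List.length_take]; omega
        simp [htl]
      rw [hdrop', pvDrops_map_add]
      rw [hdrop]
      rw [show p.drop i = p[i] :: p.drop (i + 1) from List.drop_eq_getElem_cons hlt]
      simp only [pvDrops]
      have : max 0 (p[i - 1] - p[i]) = inc := by omega
      omega
    · simp only [if_neg hc]
      rw [ih p (i + 1) t (by omega) (by omega)]
      rw [hdrop, show i + 1 - 1 = i by omega,
          show p.drop i = p[i] :: p.drop (i + 1) from List.drop_eq_getElem_cons hlt]
      simp only [pvDrops]
      omega

-- ===== VERDICT (by name: the statement is the Claim_ definition above) =====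
theorem makePowerNonDecreasing_spec : Claim_equal_makePowerNonDecreasing := by
  intro power _
  unfold Spec_makePowerNonDecreasing makePowerNonDecreasing makePowerNonDecreasing_alt
  rw [pvALoop_eq (power.length - 1) power 1 0 (by omega) rfl, pvZipFold]
  simp
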